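-- pv_equiv track=rewrite | github.com/leesunmin1231/Coding_test | 프로그래머스/랜덤/퍼즐조각채우기.py | bfs
-- ===== SOURCE A (Python) =====
-- from collections import deque
--
-- def bfs(start, table, visited):
--     q = deque()
--     q.append(start)
--     N = len(table)
--     shape = [[0]*N for _ in range(N)]
--     maxRow = 0 # 후에 shape담는 box 자르기용
--     maxCol = 0
--     minRow = N
--     minCol = N
--     # 원래 모양 shape에 담기, visited 채우기
--     while q:
--         node = q.popleft()
--         if visited[node[0]][node[1]]:
--             continue
--         visited[node[0]][node[1]] = 1
--         shape[node[0]][node[1]] = 1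
--         if node[0] > maxRow:
--             maxRow = node[0]
--         if node[1] > maxCol:
--             maxCol = node[1]
--         if node[0] < minRow:
--             minRow = node[0]
--         if node[1] < minCol:
--             minCol = node[1]
--         for next in [[node[0]-1, node[1]], [node[0]+1, node[1]], [node[0], node[1]-1], [node[0], node[1]+1]]:
--             if next[0] < 0 or next[0] >= N:
--                 continue
--             if next[1] < 0 or next[1] >= N:
--                 continue
--             if visited[next[0]][next[1]] or not table[next[0]][next[1]]:
--                 continue
--             q.append(next)
--     cutShape = [row[minCol:maxCol+1] for row in shape[minRow:maxRow + 1]]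
--     shapes = [cutShape]
--     # 회전시켜서 담기
--     for _ in range(3):
--         prev = shapes[-1]
--         n = len(prev)
--         m = len(prev[0])
--         rotate = [[0] * n for _ in range(m)]
--         for c in range(m):
--             for r in range(n):
--                 rotate[m-c-1][r] = prev[r][c]
--         shapes.append(rotate)
--     return shapes
-- ===== SOURCE B (Python) =====
-- # Different strategy: iterative depth-first flood fill with an explicit LIFO stack
-- # (A does FIFO BFS) collecting the component's cells into a list -- no N x N shape
-- # grid is painted; the bounding box is computed afterwards with min/max, the cut
-- # shape is rasterized straight from the shifted coordinate set, and each further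
-- # orientation is produced by rotating the COORDINATE set, not the previous grid.
-- # Correct because the returned grids depend only on the set of component cells,
-- # which is the same for any traversal order.  Mutates `visited` in place exactly
-- # like A (the same cells end up marked 1).
-- def bfs(start, table, visited):
--     N = len(table)
--     stack = [(start[0], start[1])]
--     cells = []
--     while stack:
--         r, c = stack.pop()
--         if visited[r][c]:
--             continue
--         visited[r][c] = 1
--         cells.append((r, c))
--         for nr, nc in ((r - 1, c), (r + 1, c), (r, c - 1), (r, c + 1)):
--             if 0 <= nr < N and 0 <= nc < N and not visited[nr][nc] and table[nr][nc]:
--                 stack.append((nr, nc))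
--     minR = min(r for r, _ in cells)
--     maxR = max(r for r, _ in cells)
--     minC = min(c for _, c in cells)
--     maxC = max(c for _, c in cells)
--     occ = {(r - minR, c - minC) for r, c in cells}
--     h, w = maxR - minR + 1, maxC - minC + 1
--     shapes = []
--     for _ in range(4):
--         shapes.append([[1 if (i, j) in occ else 0 for j in range(w)] for i in range(h)])
--         occ = {(w - 1 - c, r) for r, c in occ}
--         h, w = w, h
--     return shapes
-- ===== Notes on version B (the rewrite author's own statement) =====
-- stated objective: alternative
-- what changed: Replaces A's FIFO breadth-first search that paints and slices an N×N shape grid with a LIFO depth-first flood fill that only collects the component's cells; the bounding box is computed afterwards by min/max over the cell list, the cut shape is rasterized from the shifted coordinate set, and the three further orientations rotate the coordinate set with (r,c)↦(w-1-c,r) instead of writing a rotated copy of the previous grid (correct because the output depends only on the set of component cells, proved via traversal-order independence).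
import Mathlib
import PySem

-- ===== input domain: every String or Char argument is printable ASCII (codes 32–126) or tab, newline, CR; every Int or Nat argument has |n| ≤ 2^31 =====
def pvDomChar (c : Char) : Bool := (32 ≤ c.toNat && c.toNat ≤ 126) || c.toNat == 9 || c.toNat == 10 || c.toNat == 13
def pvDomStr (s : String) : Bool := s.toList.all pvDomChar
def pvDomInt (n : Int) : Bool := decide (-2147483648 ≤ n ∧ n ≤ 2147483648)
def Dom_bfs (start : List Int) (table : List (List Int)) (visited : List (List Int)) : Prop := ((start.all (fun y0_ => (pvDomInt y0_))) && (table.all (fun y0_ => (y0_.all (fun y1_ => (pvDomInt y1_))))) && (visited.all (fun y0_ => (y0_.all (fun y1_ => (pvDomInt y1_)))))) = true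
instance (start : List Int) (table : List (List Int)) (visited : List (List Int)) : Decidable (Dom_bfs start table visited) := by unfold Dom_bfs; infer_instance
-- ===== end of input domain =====

-- B replaces A's FIFO breadth-first search that paints and slices an N×N shape grid by a
-- LIFO depth-first flood fill that only collects the component's cells; the bounding box
-- is taken by min/max afterwards, the cut shape is rasterized from the shifted coordinate
-- set, and the further orientations rotate the coordinate set instead of the previous
-- grid.  Same return value (proved via traversal-order independence); both Pythons mutate
-- `visited` identically (the same cells end up marked 1) — the theorems are about the
-- return value.

-- shared helpers: g[r][c] reads / writes — exact for in-range indices (guaranteed by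
-- Pre_; Python would wrap negative indices / raise out of range)
def getI (g : List (List Int)) (r c : Int) : Int :=
  ((PySem.List.pyGet? ((PySem.List.pyGet? g r).getD []) c).getD 0)

def setI (g : List (List Int)) (r c : Int) (v : Int) : List (List Int) :=
  if 0 ≤ r then g.modify r.toNat (fun row => if 0 ≤ c then row.set c.toNat v else row) else g

-- ===== PORT A =====
def nbrsA (r c : Int) : List (List Int) := [[r-1,c],[r+1,c],[r,c-1],[r,c+1]]

def okA (table visited : List (List Int)) (N : Int) (nx : List Int) : Bool :=
  let a := (PySem.List.pyGet? nx 0).getD 0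
  let b := (PySem.List.pyGet? nx 1).getD 0
  !(decide (a < 0) || decide (N ≤ a)) && (!(decide (b < 0) || decide (N ≤ b)) &&
  !(decide (getI visited a b ≠ 0) || decide (getI table a b = 0)))

def bfsLoopA (table : List (List Int)) (N : Int) :
    Nat → List (List Int) → List (List Int) → List (List Int) → Int → Int → Int → Int →
    List (List Int) × Int × Int × Int × Int
  | 0, _, _, shape, maxR, maxC, minR, minC => (shape, maxR, maxC, minR, minC)
  | _+1, [], _, shape, maxR, maxC, minR, minC => (shape, maxR, maxC, minR, minC)
  | fuel+1, node :: rest, visited, shape, maxR, maxC, minR, minC =>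
    let r := (PySem.List.pyGet? node 0).getD 0
    let c := (PySem.List.pyGet? node 1).getD 0
    if getI visited r c ≠ 0 then
      bfsLoopA table N fuel rest visited shape maxR maxC minR minC
    else
      let visited' := setI visited r c 1
      bfsLoopA table N fuel (rest ++ (nbrsA r c).filter (okA table visited' N)) visited'
        (setI shape r c 1)
        (if r > maxR then r else maxR) (if c > maxC then c else maxC)
        (if r < minR then r else minR) (if c < minC then c else minC)

def rotA (prev : List (List Int)) : List (List Int) :=
  let n := prev.length
  let m := (prev.headD []).length
  (List.range m).foldl (fun rot (cc : Nat) =>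
    (List.range n).foldl (fun rot (rr : Nat) =>
      rot.modify (m - cc - 1) (fun row => row.set rr (getI prev (rr : Int) (cc : Int)))) rot)
    (List.replicate m (List.replicate n 0))

def bfs (start : List Int) (table : List (List Int)) (visited : List (List Int)) : List (List (List Int)) :=
  let N : Int := table.length
  -- fuel: the Python while-loop pops ≤ 1 + 4·N² nodes in total (each of ≤ N² markings
  -- enqueues ≤ 4); the loop is ported as fuelled recursion with that bound
  match bfsLoopA table N (4 * table.length * table.length + 2) [start] visited
      (List.replicate table.length (List.replicate table.length 0)) 0 0 N N with
  | (shape, maxR, maxC, minR, minC) =>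
    let cut := (PySem.List.slice shape (some minR) (some (maxR+1))).map
      (fun row => PySem.List.slice row (some minC) (some (maxC+1)))
    (List.range 3).foldl (fun shapes _ => shapes ++ [rotA (shapes.getLastD [])]) [cut]

-- ===== PORT B =====
def nbrsP (r c : Int) : List (Int × Int) := [(r-1,c),(r+1,c),(r,c-1),(r,c+1)]

def okB (table visited : List (List Int)) (N : Int) (p : Int × Int) : Bool :=
  decide (0 ≤ p.1) && decide (p.1 < N) && decide (0 ≤ p.2) && decide (p.2 < N) &&
  decide (getI visited p.1 p.2 = 0) && decide (getI table p.1 p.2 ≠ 0)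

-- the Python list used as a stack: top of stack = head here, so the neighbours pushed
-- by the for-loop (and popped last-in first-out) are the filtered list reversed
def bfsLoopB (table : List (List Int)) (N : Int) :
    Nat → List (Int × Int) → List (List Int) → List (Int × Int) → List (Int × Int)
  | 0, _, _, cells => cells
  | _+1, [], _, cells => cells
  | fuel+1, (r, c) :: stack, visited, cells =>
    if getI visited r c ≠ 0 then bfsLoopB table N fuel stack visited cells
    else
      let visited' := setI visited r c 1
      bfsLoopB table N fuel (((nbrsP r c).filter (okB table visited' N)).reverse ++ stack)
        visited' (cells ++ [(r, c)])

def bfs_alt (start : List Int) (table : List (List Int)) (visited : List (List Int)) : List (List (List Int)) :=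
  let N : Int := table.length
  -- same fuel bound as A's loop: ≤ 1 + 4·N² pops in total
  let cells := bfsLoopB table N (4 * table.length * table.length + 2)
    [((PySem.List.pyGet? start 0).getD 0, (PySem.List.pyGet? start 1).getD 0)] visited []
  -- Python min/max raise on an empty sequence (start already visited) — excluded by Pre_
  let minR := (PySem.List.min? (cells.map Prod.fst) (fun x => x)).getD 0
  let maxR := (PySem.List.max? (cells.map Prod.fst) (fun x => x)).getD 0
  let minC := (PySem.List.min? (cells.map Prod.snd) (fun x => x)).getD 0
  let maxC := (PySem.List.max? (cells.map Prod.snd) (fun x => x)).getD 0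
  let occ0 : PySem.Set (Int × Int) := PySem.Set.ofList (cells.map (fun p => (p.1 - minR, p.2 - minC)))
  let h : Int := maxR - minR + 1
  let w : Int := maxC - minC + 1
  ((List.range 4).foldl (fun st _ =>
      let shapes := st.1
      let occ := st.2.1
      let h := st.2.2.1
      let w := st.2.2.2
      (shapes ++ [(List.range h.toNat).map (fun (i : Nat) =>
          (List.range w.toNat).map (fun (j : Nat) =>
            if ((i : Int), (j : Int)) ∈ occ then (1 : Int) else 0))],
       PySem.Set.ofList (occ.map (fun p => (w - 1 - p.2, p.1))), w, h))
    (([] : List (List (List Int))), occ0, h, w)).1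

-- ===== PRECONDITION & SPEC =====
-- Pre_: inputs on which Python A returns and equals B: the start indices are in-range
-- nonnegative (a negative, wrapping start is excluded; A returns on some of those — see
-- claim cites), the start cell is readable and unvisited, and EITHER the first N rows of
-- visited are at least N wide (so every in-range cell is readable/writable) and every
-- in-range UNVISITED cell is readable in table (only those are ever read there), OR the
-- start cell is isolated (every in-range neighbour readable and already visited), where A
-- returns without touching the rest of the grids. A ragged grid whose short row the BFS
-- merely happens to avoid is conservatively excluded (see claim cites).
def Pre_bfs (start : List Int) (table : List (List Int)) (visited : List (List Int)) : Prop :=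
  let N : Int := table.length
  let r := (PySem.List.pyGet? start 0).getD 0
  let c := (PySem.List.pyGet? start 1).getD 0
  0 < table.length ∧ 2 ≤ start.length ∧
  0 ≤ r ∧ r < N ∧ 0 ≤ c ∧ c < N ∧
  r.toNat < visited.length ∧ c.toNat < (visited.getD r.toNat []).length ∧
  getI visited r c = 0 ∧
  ((table.length ≤ visited.length ∧
      (∀ i < table.length, table.length ≤ (visited.getD i []).length) ∧
      (∀ i < table.length, ∀ j < table.length,
        getI visited (i : Int) (j : Int) = 0 → j < (table.getD i []).length)) ∨
    (∀ p ∈ [(r-1,c),(r+1,c),(r,c-1),(r,c+1)], 0 ≤ p.1 → p.1 < N → 0 ≤ p.2 → p.2 < N →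
      p.1.toNat < visited.length ∧ p.2.toNat < (visited.getD p.1.toNat []).length ∧
      getI visited p.1 p.2 ≠ 0))

instance (start : List Int) (table : List (List Int)) (visited : List (List Int)) : Decidable (Pre_bfs start table visited) := by unfold Pre_bfs; infer_instance

def pvWitness_bfs : List Int × List (List Int) × List (List Int) :=
  ([0, 0], [[1, 1], [1, 0]], [[0, 0], [0, 0]])

def Spec_bfs (start : List Int) (table : List (List Int)) (visited : List (List Int)) (out : List (List (List Int))) : Prop := out = bfs_alt start table visited
instance (start : List Int) (table : List (List Int)) (visited : List (List Int)) (out : List (List (List Int))) : Decidable (Spec_bfs start table visited out) := by unfold Spec_bfs; infer_instance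

-- ===== CLAIM (what is proved, stated in full; the proofs are below) =====
def Claim_equal_bfs : Prop := ∀ (start : List Int) (table : List (List Int)) (visited : List (List Int)), Dom_bfs start table visited → Pre_bfs start table visited → Spec_bfs start table visited (bfs start table visited)

-- ===== LEMMAS AND PROOFS =====

theorem pyGet_pair0 (a b : Int) : (PySem.List.pyGet? [a, b] 0).getD 0 = a := by
  simp [PySem.List.pyGet?, PySem.List.pyIdx?]

theorem pyGet_pair1 (a b : Int) : (PySem.List.pyGet? [a, b] 1).getD 0 = b := by
  simp [PySem.List.pyGet?, PySem.List.pyIdx?]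

def pairOf (node : List Int) : Int × Int :=
  ((PySem.List.pyGet? node 0).getD 0, (PySem.List.pyGet? node 1).getD 0)

theorem pairOf_pair (a b : Int) : pairOf [a, b] = (a, b) := by
  simp [pairOf, pyGet_pair0, pyGet_pair1]

def inRN (N : Int) (p : Int × Int) : Prop := 0 ≤ p.1 ∧ p.1 < N ∧ 0 ≤ p.2 ∧ p.2 < N

theorem ok_link (table visited : List (List Int)) (N a b : Int) :
    okA table visited N [a, b] = okB table visited N (a, b) := by
  simp only [okA, okB, pyGet_pair0, pyGet_pair1]
  by_cases h1 : a < 0 <;> by_cases h2 : N ≤ a <;> by_cases h3 : b < 0 <;> by_cases h4 : N ≤ b <;>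
    by_cases h5 : getI visited a b = 0 <;> by_cases h6 : getI table a b = 0 <;>
    simp_all <;> omega

theorem okB_inR (t v : List (List Int)) (N : Int) (p : Int × Int) (h : okB t v N p = true) :
    inRN N p := by
  simp [okB] at h
  exact ⟨by tauto, by tauto, by tauto, by tauto⟩

theorem okB_iff (t v : List (List Int)) (N : Int) (p : Int × Int) :
    okB t v N p = true ↔ inRN N p ∧ getI v p.1 p.2 = 0 ∧ getI t p.1 p.2 ≠ 0 := by
  simp [okB, inRN, and_assoc]

-- ---- low-level getI/setI facts ----

theorem getI_nonneg (v : List (List Int)) (a b : Int) (ha : 0 ≤ a) (hb : 0 ≤ b) :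
    getI v a b = ((v[a.toNat]?.getD [])[b.toNat]?).getD 0 := by
  have h1 : a = ((a.toNat : Nat) : Int) := by omega
  have h2 : b = ((b.toNat : Nat) : Int) := by omega
  rw [getI, h1, h2, PySem.List.pyGet?_natCast, PySem.List.pyGet?_natCast]
  simp only [Int.toNat_natCast]

theorem getI_setI_ne (v : List (List Int)) (r c a b x : Int)
    (ha : 0 ≤ a) (hb : 0 ≤ b) (hne : a ≠ r ∨ b ≠ c) :
    getI (setI v r c x) a b = getI v a b := by
  by_cases hr : 0 ≤ r
  · rw [setI, if_pos hr, getI_nonneg _ _ _ ha hb, getI_nonneg v _ _ ha hb,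
      List.getElem?_modify]
    cases hv : v[a.toNat]? with
    | none => simp
    | some row =>
      by_cases har : r.toNat = a.toNat
      · have ha' : a = r := by omega
        have hbc : b ≠ c := by tauto
        by_cases hc : 0 ≤ c
        · simp only [if_pos har, if_pos hc]
          rw [show ((fun a => List.set a c.toNat x) <$> some row).getD [] = row.set c.toNat x
            from rfl]
          rw [List.getElem?_set_ne (show c.toNat ≠ b.toNat by omega)]
          rfl
        · simp [if_neg hc]
      · simp [if_neg har]
  · rw [setI, if_neg hr]

theorem getI_setI_self (v : List (List Int)) (r c x : Int)
    (hr : 0 ≤ r) (hc : 0 ≤ c) (h1 : r.toNat < v.length)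
    (h2 : c.toNat < (v.getD r.toNat []).length) :
    getI (setI v r c x) r c = x := by
  have hrow : v.getD r.toNat [] = v[r.toNat] := by
    rw [List.getD_eq_getElem?_getD, List.getElem?_eq_getElem h1]; rfl
  rw [hrow] at h2
  rw [setI, if_pos hr, getI_nonneg _ _ _ hr hc, List.getElem?_modify,
    List.getElem?_eq_getElem h1]
  simp [hc, List.getElem?_set_self (show c.toNat < v[r.toNat].length from by simpa using h2)]

def gridWF (N : Int) (v : List (List Int)) : Prop :=
  N ≤ (v.length : Int) ∧ ∀ i : Nat, (i : Int) < N → N ≤ ((v.getD i []).length : Int)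

theorem getD_modify (v : List (List Int)) (k i : Nat) (f : List Int → List Int) :
    (v.modify k f).getD i [] = if k = i ∧ i < v.length then f (v.getD i []) else v.getD i [] := by
  rw [List.getD_eq_getElem?_getD, List.getD_eq_getElem?_getD, List.getElem?_modify]
  by_cases hk : k = i
  · subst hk
    by_cases hi : k < v.length
    · rw [List.getElem?_eq_getElem hi, if_pos ⟨rfl, hi⟩]
      simp
    · rw [List.getElem?_eq_none (by omega), if_neg (fun h => hi h.2)]
      simp
  · rw [if_neg (fun h => hk h.1)]
    simp [hk]

theorem gridWF_setI (N : Int) (v : List (List Int)) (r c x : Int) (h : gridWF N v) :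
    gridWF N (setI v r c x) := by
  obtain ⟨h1, h2⟩ := h
  by_cases hr : 0 ≤ r
  · rw [setI, if_pos hr]
    refine ⟨by simpa using h1, ?_⟩
    intro i hi
    rw [getD_modify]
    split_ifs with ha hb
    · simpa using h2 i hi
    · exact h2 i hi
    · exact h2 i hi
  · rw [setI, if_neg hr]; exact ⟨h1, h2⟩

theorem gridWF_bounds (N : Int) (v : List (List Int)) (h : gridWF N v) (p : Int × Int)
    (hp : inRN N p) :
    p.1.toNat < v.length ∧ p.2.toNat < (v.getD p.1.toNat []).length := by
  obtain ⟨h1, h2⟩ := h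
  obtain ⟨a1, a2, a3, a4⟩ := hp
  have hlen : p.1.toNat < v.length := by omega
  have := h2 p.1.toNat (by omega)
  omega

theorem getI_setI_self' (N : Int) (v : List (List Int)) (p : Int × Int) (x : Int)
    (h : gridWF N v) (hp : inRN N p) : getI (setI v p.1 p.2 x) p.1 p.2 = x := by
  obtain ⟨h1, h2⟩ := gridWF_bounds N v h p hp
  exact getI_setI_self v p.1 p.2 x hp.1 hp.2.2.1 h1 h2

-- ---- generic trace of the worklist loop ----

def gtrace (table : List (List Int)) (N : Int)
    (comb : List (Int × Int) → List (Int × Int) → List (Int × Int)) :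
    Nat → List (Int × Int) → List (List Int) → List (Int × Int)
  | 0, _, _ => []
  | _+1, [], _ => []
  | fuel+1, p :: rest, vis =>
    if getI vis p.1 p.2 ≠ 0 then gtrace table N comb fuel rest vis
    else p :: gtrace table N comb fuel
      (comb ((nbrsP p.1 p.2).filter (okB table (setI vis p.1 p.2 1) N)) rest)
      (setI vis p.1 p.2 1)

def combA (nw rest : List (Int × Int)) : List (Int × Int) := rest ++ nw
def combB (nw rest : List (Int × Int)) : List (Int × Int) := nw.reverse ++ rest

-- ---- reachability: the marked set, independent of worklist order ----

inductive reachR (table : List (List Int)) (N : Int) :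
    List (List Int) → List (Int × Int) → (Int × Int) → Prop
  | base (vis : List (List Int)) (q : List (Int × Int)) (p : Int × Int) :
      p ∈ q → inRN N p → getI vis p.1 p.2 = 0 → reachR table N vis q p
  | step (vis : List (List Int)) (q : List (Int × Int)) (p x : Int × Int) :
      reachR table N vis q p → x ∈ nbrsP p.1 p.2 → inRN N x →
      getI table x.1 x.2 ≠ 0 → getI vis x.1 x.2 = 0 → reachR table N vis q x

theorem reachR_inR (table : List (List Int)) (N : Int) (vis : List (List Int))
    (q : List (Int × Int)) (x : Int × Int) (h : reachR table N vis q x) : inRN N x := by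
  cases h with
  | base _ _ h2 _ => exact h2
  | step _ _ _ _ h3 _ _ => exact h3

theorem reachR_nil (table : List (List Int)) (N : Int) (vis : List (List Int)) (x : Int × Int)
    (h : reachR table N vis [] x) : False := by
  induction h with
  | base _ h1 _ _ => simp at h1
  | step => assumption

theorem reachR_congr (table : List (List Int)) (N : Int) (vis : List (List Int))
    (q q' : List (Int × Int)) (hq : ∀ y, y ∈ q → y ∈ q') (x : Int × Int)
    (h : reachR table N vis q x) : reachR table N vis q' x := by
  induction h with
  | base p h1 h2 h3 => exact reachR.base _ _ p (hq p h1) h2 h3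
  | step p x _ h2 h3 h4 h5 ih => exact reachR.step _ _ p x ih h2 h3 h4 h5

theorem reachR_dup (table : List (List Int)) (N : Int) (vis : List (List Int))
    (p : Int × Int) (rest : List (Int × Int)) (hp : getI vis p.1 p.2 ≠ 0) (x : Int × Int) :
    reachR table N vis (p :: rest) x ↔ reachR table N vis rest x := by
  constructor
  · intro h
    induction h with
    | base y h1 h2 h3 =>
      rcases List.mem_cons.mp h1 with rfl | h1
      · exact absurd h3 hp
      · exact reachR.base _ _ y h1 h2 h3
    | step y x _ h2 h3 h4 h5 ih => exact reachR.step _ _ y x ih h2 h3 h4 h5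
  · intro h
    exact reachR_congr table N vis rest _ (fun y hy => List.mem_cons_of_mem _ hy) x h

theorem reachR_mark (table : List (List Int)) (N : Int) (vis : List (List Int))
    (p : Int × Int) (rest : List (Int × Int)) (hWF : gridWF N vis) (hp : inRN N p)
    (hvp : getI vis p.1 p.2 = 0) (x : Int × Int) :
    reachR table N vis (p :: rest) x ↔
      (x = p ∨ reachR table N (setI vis p.1 p.2 1)
        ((nbrsP p.1 p.2).filter (okB table (setI vis p.1 p.2 1) N) ++ rest) x) := by
  have hmarked : getI (setI vis p.1 p.2 1) p.1 p.2 = 1 := getI_setI_self' N vis p 1 hWF hp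
  have hother : ∀ y : Int × Int, inRN N y → y ≠ p →
      getI (setI vis p.1 p.2 1) y.1 y.2 = getI vis y.1 y.2 := by
    intro y hy hne
    refine getI_setI_ne vis p.1 p.2 y.1 y.2 1 hy.1 hy.2.2.1 ?_
    by_cases h1 : y.1 = p.1
    · right; intro h2; exact hne (Prod.ext h1 h2)
    · left; exact h1
  constructor
  · intro h
    induction h with
    | base y h1 h2 h3 =>
      rcases List.mem_cons.mp h1 with rfl | h1
      · exact Or.inl rfl
      · by_cases hyp : y = p
        · exact Or.inl hyp
        · refine Or.inr (reachR.base _ _ y (List.mem_append_right _ h1) h2 ?_)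
          rw [hother y h2 hyp]; exact h3
    | step y x _ h2 h3 h4 h5 ih =>
      by_cases hxp : x = p
      · exact Or.inl hxp
      · have hx5 : getI (setI vis p.1 p.2 1) x.1 x.2 = 0 := by
          rw [hother x h3 hxp]; exact h5
        rcases ih with rfl | ih
        · refine Or.inr (reachR.base _ _ x (List.mem_append_left _ ?_) h3 hx5)
          rw [List.mem_filter]
          exact ⟨h2, (okB_iff _ _ _ _).mpr ⟨h3, hx5, h4⟩⟩
        · exact Or.inr (reachR.step _ _ y x ih h2 h3 h4 hx5)
  · intro h
    have hbasep : reachR table N vis (p :: rest) p :=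
      reachR.base _ _ p List.mem_cons_self hp hvp
    rcases h with rfl | h
    · exact hbasep
    · induction h with
      | base y h1 h2 h3 =>
        have hyp : y ≠ p := by
          intro he; subst he; rw [hmarked] at h3; exact one_ne_zero h3
        have h3' : getI vis y.1 y.2 = 0 := by rw [← hother y h2 hyp]; exact h3
        rcases List.mem_append.mp h1 with h1 | h1
        · rw [List.mem_filter] at h1
          obtain ⟨hnb, hok⟩ := h1
          obtain ⟨hin, _, htab⟩ := (okB_iff _ _ _ _).mp hok
          exact reachR.step _ _ p y hbasep hnb hin htab h3'
        · exact reachR.base _ _ y (List.mem_cons_of_mem _ h1) h2 h3'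
      | step y x _ h2 h3 h4 h5 ih =>
        have hxp : x ≠ p := by
          intro he; subst he; rw [hmarked] at h5; exact one_ne_zero h5
        have h5' : getI vis x.1 x.2 = 0 := by rw [← hother x h3 hxp]; exact h5
        exact reachR.step _ _ y x ih h2 h3 h4 h5'

-- ---- counting: number of unvisited in-range cells ----

def unvC (N : Int) (v : List (List Int)) : Nat :=
  ((Finset.range N.toNat ×ˢ Finset.range N.toNat).filter
    (fun ij => getI v (ij.1 : Int) (ij.2 : Int) = 0)).card

theorem unvC_le (N : Int) (v : List (List Int)) : unvC N v ≤ N.toNat * N.toNat := by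
  calc ((Finset.range N.toNat ×ˢ Finset.range N.toNat).filter
      (fun ij => getI v (ij.1 : Int) (ij.2 : Int) = 0)).card
      ≤ (Finset.range N.toNat ×ˢ Finset.range N.toNat).card := Finset.card_filter_le _ _
    _ = N.toNat * N.toNat := by simp [Finset.card_product]

theorem unvC_mark (N : Int) (v : List (List Int)) (p : Int × Int) (hWF : gridWF N v)
    (hp : inRN N p) (hvp : getI v p.1 p.2 = 0) :
    unvC N (setI v p.1 p.2 1) + 1 ≤ unvC N v := by
  have hmarked : getI (setI v p.1 p.2 1) p.1 p.2 = 1 := getI_setI_self' N v p 1 hWF hp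
  obtain ⟨a1, a2, a3, a4⟩ := hp
  have hpmem : (p.1.toNat, p.2.toNat) ∈
      (Finset.range N.toNat ×ˢ Finset.range N.toNat).filter
        (fun ij => getI v (ij.1 : Int) (ij.2 : Int) = 0) := by
    rw [Finset.mem_filter, Finset.mem_product, Finset.mem_range, Finset.mem_range]
    refine ⟨⟨by omega, by omega⟩, ?_⟩
    have e1 : ((p.1.toNat : Nat) : Int) = p.1 := by omega
    have e2 : ((p.2.toNat : Nat) : Int) = p.2 := by omega
    rw [e1, e2]; exact hvp
  have hsub : (Finset.range N.toNat ×ˢ Finset.range N.toNat).filter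
        (fun ij => getI (setI v p.1 p.2 1) (ij.1 : Int) (ij.2 : Int) = 0) ⊆
      ((Finset.range N.toNat ×ˢ Finset.range N.toNat).filter
        (fun ij => getI v (ij.1 : Int) (ij.2 : Int) = 0)).erase (p.1.toNat, p.2.toNat) := by
    intro ij hij
    rw [Finset.mem_filter] at hij
    obtain ⟨hmem, hz⟩ := hij
    have hne : ij ≠ (p.1.toNat, p.2.toNat) := by
      intro he; subst he
      have e1 : ((p.1.toNat : Nat) : Int) = p.1 := by omega
      have e2 : ((p.2.toNat : Nat) : Int) = p.2 := by omega
      rw [e1, e2, hmarked] at hz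
      exact one_ne_zero hz
    rw [Finset.mem_erase]
    refine ⟨hne, ?_⟩
    rw [Finset.mem_filter]
    refine ⟨hmem, ?_⟩
    rw [← hz]
    refine (getI_setI_ne v p.1 p.2 _ _ 1 (by positivity) (by positivity) ?_).symm
    by_cases h1 : (ij.1 : Int) = p.1
    · right
      intro h2
      exact hne (Prod.ext (by omega) (by omega))
    · left; exact h1
  have := Finset.card_le_card hsub
  rw [Finset.card_erase_of_mem hpmem] at this
  have hpos : 0 < ((Finset.range N.toNat ×ˢ Finset.range N.toNat).filter
      (fun ij => getI v (ij.1 : Int) (ij.2 : Int) = 0)).card :=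
    Finset.card_pos.mpr ⟨_, hpmem⟩
  unfold unvC
  omega

-- ---- the characterisation: membership in the trace = reachability ----

theorem gtrace_mem (table : List (List Int)) (N : Int)
    (comb : List (Int × Int) → List (Int × Int) → List (Int × Int))
    (hlen : ∀ nw rest, (comb nw rest).length = nw.length + rest.length)
    (hmem : ∀ nw rest x, x ∈ comb nw rest ↔ x ∈ nw ∨ x ∈ rest) :
    ∀ (fuel : Nat) (q : List (Int × Int)) (vis : List (List Int)), gridWF N vis →
      (∀ p ∈ q, inRN N p) → q.length + 4 * unvC N vis ≤ fuel →
      ∀ x, x ∈ gtrace table N comb fuel q vis ↔ reachR table N vis q x := by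
  intro fuel
  induction fuel with
  | zero =>
    intro q vis _ _ hb x
    have hq0 : q = [] := by
      have := List.length_eq_zero_iff.mp (by omega : q.length = 0)
      exact this
    subst hq0
    simp only [gtrace, List.not_mem_nil, false_iff]
    exact fun h => reachR_nil table N vis x h
  | succ f ih =>
    intro q vis hWF hq hb x
    match q with
    | [] =>
      simp only [gtrace, List.not_mem_nil, false_iff]
      exact fun h => reachR_nil table N vis x h
    | p :: rest =>
      have hp : inRN N p := hq p List.mem_cons_self
      rw [gtrace]
      by_cases hvp : getI vis p.1 p.2 ≠ 0
      · rw [if_pos hvp]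
        rw [ih rest vis hWF (fun y hy => hq y (List.mem_cons_of_mem _ hy))
          (by simp only [List.length_cons] at hb; omega) x]
        exact (reachR_dup table N vis p rest hvp x).symm
      · push Not at hvp
        rw [if_neg (by simp [hvp])]
        have hWF' := gridWF_setI N vis p.1 p.2 1 hWF
        have hU := unvC_mark N vis p hWF hp hvp
        have hnewlen : ((nbrsP p.1 p.2).filter
            (okB table (setI vis p.1 p.2 1) N)).length ≤ 4 := by
          calc ((nbrsP p.1 p.2).filter (okB table (setI vis p.1 p.2 1) N)).length
              ≤ (nbrsP p.1 p.2).length := List.length_filter_le _ _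
            _ = 4 := rfl
        have hq' : ∀ y ∈ comb ((nbrsP p.1 p.2).filter (okB table (setI vis p.1 p.2 1) N))
            rest, inRN N y := by
          intro y hy
          rcases (hmem _ _ y).mp hy with hy | hy
          · exact okB_inR _ _ _ _ (List.of_mem_filter hy)
          · exact hq y (List.mem_cons_of_mem _ hy)
        have hb' : (comb ((nbrsP p.1 p.2).filter (okB table (setI vis p.1 p.2 1) N))
            rest).length + 4 * unvC N (setI vis p.1 p.2 1) ≤ f := by
          rw [hlen]
          simp only [List.length_cons] at hb
          omega
        rw [List.mem_cons, ih _ _ hWF' hq' hb' x]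
        rw [reachR_mark table N vis p rest hWF hp hvp x]
        constructor
        · rintro (h | h)
          · exact Or.inl h
          · exact Or.inr (reachR_congr table N _ _ _
              (fun y hy => by
                rcases (hmem _ _ y).mp hy with hy | hy
                · exact List.mem_append_left _ hy
                · exact List.mem_append_right _ hy) x h)
        · rintro (h | h)
          · exact Or.inl h
          · exact Or.inr (reachR_congr table N _ _ _
              (fun y hy => by
                rcases List.mem_append.mp hy with hy | hy
                · exact (hmem _ _ y).mpr (Or.inl hy)
                · exact (hmem _ _ y).mpr (Or.inr hy)) x h)

-- ---- linking the two ports' loops to gtrace ----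

theorem linkB (table : List (List Int)) (N : Int) :
    ∀ (fuel : Nat) (st : List (Int × Int)) (vis : List (List Int)) (cells : List (Int × Int)),
      bfsLoopB table N fuel st vis cells = cells ++ gtrace table N combB fuel st vis
  | 0, st, vis, cells => by simp [bfsLoopB, gtrace]
  | fuel+1, [], vis, cells => by simp [bfsLoopB, gtrace]
  | fuel+1, (r, c) :: stack, vis, cells => by
    rw [bfsLoopB, gtrace]
    by_cases h : getI vis r c ≠ 0
    · rw [if_pos h, if_pos h, linkB table N fuel stack vis cells]
    · rw [if_neg h, if_neg h]
      rw [linkB table N fuel _ _ (cells ++ [(r, c)])]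
      simp [combB]

theorem nbrs_link (t v : List (List Int)) (N r c : Int) :
    ((nbrsA r c).filter (okA t v N)).map pairOf = (nbrsP r c).filter (okB t v N) := by
  simp only [nbrsA, nbrsP, List.filter_cons, List.filter_nil, ok_link]
  by_cases h1 : okB t v N (r-1,c) <;> by_cases h2 : okB t v N (r+1,c) <;>
    by_cases h3 : okB t v N (r,c-1) <;> by_cases h4 : okB t v N (r,c+1) <;>
    simp [h1, h2, h3, h4, pairOf_pair]

theorem linkA (table : List (List Int)) (N : Int) :
    ∀ (fuel : Nat) (qA : List (List Int)) (vis : List (List Int))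
      (shape : List (List Int)) (maxR maxC minR minC : Int),
      bfsLoopA table N fuel qA vis shape maxR maxC minR minC =
        ((gtrace table N combA fuel (qA.map pairOf) vis).foldl
            (fun g p => setI g p.1 p.2 1) shape,
         (gtrace table N combA fuel (qA.map pairOf) vis).foldl
            (fun a p => if p.1 > a then p.1 else a) maxR,
         (gtrace table N combA fuel (qA.map pairOf) vis).foldl
            (fun a p => if p.2 > a then p.2 else a) maxC,
         (gtrace table N combA fuel (qA.map pairOf) vis).foldl
            (fun a p => if p.1 < a then p.1 else a) minR,
         (gtrace table N combA fuel (qA.map pairOf) vis).foldl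
            (fun a p => if p.2 < a then p.2 else a) minC)
  | 0, qA, vis, shape, maxR, maxC, minR, minC => by simp [bfsLoopA, gtrace]
  | fuel+1, [], vis, shape, maxR, maxC, minR, minC => by simp [bfsLoopA, gtrace]
  | fuel+1, node :: rest, vis, shape, maxR, maxC, minR, minC => by
    have hmap : (node :: rest).map pairOf =
        ((PySem.List.pyGet? node 0).getD 0, (PySem.List.pyGet? node 1).getD 0)
          :: rest.map pairOf := rfl
    rw [bfsLoopA, hmap, gtrace]
    dsimp only
    by_cases h : getI vis ((PySem.List.pyGet? node 0).getD 0)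
        ((PySem.List.pyGet? node 1).getD 0) ≠ 0
    · simp only [if_pos h]
      rw [linkA table N fuel rest vis shape maxR maxC minR minC]
    · simp only [if_neg h]
      rw [linkA table N fuel (rest ++ (nbrsA ((PySem.List.pyGet? node 0).getD 0)
          ((PySem.List.pyGet? node 1).getD 0)).filter
          (okA table (setI vis ((PySem.List.pyGet? node 0).getD 0)
            ((PySem.List.pyGet? node 1).getD 0) 1) N)) _ _ _ _ _ _]
      rw [List.map_append, nbrs_link]
      simp [combA, nbrsP]


-- ---- grid machinery ----

def mkGrid (n m : Nat) (f : Nat → Nat → Int) : List (List Int) :=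
  (List.range n).map (fun i => (List.range m).map (fun j => f i j))

theorem mkGrid_congr {n m : Nat} {f g : Nat → Nat → Int}
    (h : ∀ i < n, ∀ j < m, f i j = g i j) : mkGrid n m f = mkGrid n m g := by
  simp only [mkGrid]
  apply List.map_congr_left
  intro i hi
  exact List.map_congr_left fun j hj => h i (List.mem_range.mp hi) j (List.mem_range.mp hj)

theorem modify_set_mkGrid (n m : Nat) (f : Nat → Nat → Int) (i j : Nat) (v : Int)
    (hi : i < n) (hj : j < m) :
    (mkGrid n m f).modify i (fun row => row.set j v) =
      mkGrid n m (fun i' j' => if i' = i ∧ j' = j then v else f i' j') := by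
  apply List.ext_getElem
  · simp [mkGrid]
  · intro k h1 h2
    simp only [mkGrid, List.getElem_modify, List.getElem_map, List.getElem_range,
      List.length_map, List.length_range] at *
    by_cases hk : k = i
    · subst hk
      simp only [if_pos rfl]
      apply List.ext_getElem
      · simp
      · intro l h3 h4
        simp only [List.getElem_set, List.getElem_map, List.getElem_range] at *
        by_cases hl : l = j
        · subst hl; simp
        · simp [hl, Ne.symm hl]
    · rw [if_neg (fun h => absurd h.symm hk)]
      apply List.map_congr_left
      intro j' _
      rw [if_neg (by simp [hk])]

def raster (n : Nat) (cells : List (Int × Int)) : List (List Int) :=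
  mkGrid n n (fun i j => if ((i : Int), (j : Int)) ∈ cells then 1 else 0)

theorem setI_mkGrid (n m : Nat) (f : Nat → Nat → Int) (r c v : Int)
    (hr0 : 0 ≤ r) (hr : r < (n : Int)) (hc0 : 0 ≤ c) (hc : c < (m : Int)) :
    setI (mkGrid n m f) r c v =
      mkGrid n m (fun i j => if (i : Int) = r ∧ (j : Int) = c then v else f i j) := by
  rw [setI, if_pos hr0]
  have : (fun row : List Int => if 0 ≤ c then row.set c.toNat v else row)
      = fun row : List Int => row.set c.toNat v := by funext row; rw [if_pos hc0]
  rw [this, modify_set_mkGrid n m f r.toNat c.toNat v (by omega) (by omega)]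
  exact mkGrid_congr (by intro i hi j hj; congr 1; simp; constructor <;> (intro ⟨x,y⟩) <;> omega)

theorem setI_raster (n : Nat) (cells : List (Int × Int)) (r c : Int)
    (hr0 : 0 ≤ r) (hr : r < (n : Int)) (hc0 : 0 ≤ c) (hc : c < (n : Int)) :
    setI (raster n cells) r c 1 = raster n (cells ++ [(r, c)]) := by
  rw [raster, setI_mkGrid n n _ r c 1 hr0 hr hc0 hc]
  exact mkGrid_congr (by
    intro i hi j hj
    by_cases h : (i : Int) = r ∧ (j : Int) = c
    · simp [h, h.1, h.2]
    · rw [if_neg h]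
      have hmem : (((i:Int),(j:Int)) ∈ cells ++ [(r,c)]) ↔ (((i:Int),(j:Int)) ∈ cells) := by
        constructor
        · intro hm
          rcases List.mem_append.mp hm with hm | hm
          · exact hm
          · simp only [List.mem_singleton, Prod.mk.injEq] at hm
            exact absurd ⟨hm.1, hm.2⟩ h
        · intro hm; exact List.mem_append.mpr (Or.inl hm)
      simp only [hmem])

theorem fold_setI_raster (n : Nat) :
    ∀ (cells pre : List (Int × Int)), (∀ p ∈ cells, 0 ≤ p.1 ∧ p.1 < (n:Int) ∧ 0 ≤ p.2 ∧ p.2 < (n:Int)) →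
    cells.foldl (fun g p => setI g p.1 p.2 1) (raster n pre) = raster n (pre ++ cells)
  | [], pre, _ => by simp
  | p :: cells, pre, h => by
    simp only [List.foldl_cons]
    rw [setI_raster n pre p.1 p.2 (h p (by simp)).1 (h p (by simp)).2.1 (h p (by simp)).2.2.1
      (h p (by simp)).2.2.2, fold_setI_raster n cells (pre ++ [p]) (fun q hq => h q (by simp [hq]))]
    simp

theorem raster_nil (n : Nat) : raster n [] = List.replicate n (List.replicate n 0) := by
  apply List.ext_getElem
  · simp [raster, mkGrid]
  · intro k h1 h2
    simp [raster, mkGrid]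

theorem fold_min_facts (g : Int × Int → Int) :
    ∀ (l : List (Int × Int)) (init : Int),
      (l.foldl (fun a p => if g p < a then g p else a) init ≤ init) ∧
      (∀ p ∈ l, l.foldl (fun a p => if g p < a then g p else a) init ≤ g p) ∧
      (∀ c : Int, c ≤ init → (∀ p ∈ l, c ≤ g p) → c ≤ l.foldl (fun a p => if g p < a then g p else a) init) ∧
      (l.foldl (fun a p => if g p < a then g p else a) init = init ∨
        l.foldl (fun a p => if g p < a then g p else a) init ∈ l.map g)
  | [], init => by simp
  | p :: l, init => by
    simp only [List.foldl_cons, List.mem_cons]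
    obtain ⟨ih1, ih2, ih3, ih4⟩ := fold_min_facts g l (if g p < init then g p else init)
    refine ⟨by split_ifs at ih1 ⊢ <;> omega, ?_, ?_, ?_⟩
    · rintro q (rfl | hq)
      · have := ih1; split_ifs at this <;> omega
      · exact ih2 q hq
    · intro c hc hall
      exact ih3 c (by have := hall p (Or.inl rfl); split_ifs <;> omega)
        (fun q hq => hall q (Or.inr hq))
    · rcases ih4 with h | h
      · rw [h]
        split_ifs
        · right; simp
        · left; rfl
      · right; simp only [List.map_cons, List.mem_cons]; exact Or.inr h

theorem fold_max_facts (g : Int × Int → Int) :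
    ∀ (l : List (Int × Int)) (init : Int),
      (init ≤ l.foldl (fun a p => if g p > a then g p else a) init) ∧
      (∀ p ∈ l, g p ≤ l.foldl (fun a p => if g p > a then g p else a) init) ∧
      (∀ c : Int, init ≤ c → (∀ p ∈ l, g p ≤ c) → l.foldl (fun a p => if g p > a then g p else a) init ≤ c) ∧
      (l.foldl (fun a p => if g p > a then g p else a) init = init ∨
        l.foldl (fun a p => if g p > a then g p else a) init ∈ l.map g)
  | [], init => by simp
  | p :: l, init => by
    simp only [List.foldl_cons, List.mem_cons]
    obtain ⟨ih1, ih2, ih3, ih4⟩ := fold_max_facts g l (if g p > init then g p else init)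
    refine ⟨by split_ifs at ih1 ⊢ <;> omega, ?_, ?_, ?_⟩
    · rintro q (rfl | hq)
      · have := ih1; split_ifs at this <;> omega
      · exact ih2 q hq
    · intro c hc hall
      exact ih3 c (by have := hall p (Or.inl rfl); split_ifs <;> omega)
        (fun q hq => hall q (Or.inr hq))
    · rcases ih4 with h | h
      · rw [h]
        split_ifs
        · right; simp
        · left; rfl
      · right; simp only [List.map_cons, List.mem_cons]; exact Or.inr h

theorem slice_range_map {α : Type} (n : Nat) (g : Nat → α) (a b : Int)
    (ha : 0 ≤ a) (hab : a ≤ b) (hb : b ≤ (n : Int)) :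
    PySem.List.slice ((List.range n).map g) (some a) (some b) =
      (List.range (b - a).toNat).map (fun i => g (a.toNat + i)) := by
  rw [PySem.List.slice_toNat _ ha (by omega)]
  apply List.ext_getElem
  · simp; omega
  · intro k h1 h2
    simp only [List.getElem_take, List.getElem_drop, List.getElem_map, List.getElem_range] at *

theorem getI_mkGrid (n m : Nat) (f : Nat → Nat → Int) (r c : Nat) (hr : r < n) (hc : c < m) :
    getI (mkGrid n m f) (r : Int) (c : Int) = f r c := by
  simp [getI, PySem.List.pyGet?_natCast, mkGrid, List.getElem?_map, List.getElem?_range, hr, hc]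

theorem replicate_mkGrid (n m : Nat) : List.replicate n (List.replicate m (0:Int)) = mkGrid n m (fun _ _ => 0) := by
  apply List.ext_getElem
  · simp [mkGrid]
  · intro k h1 h2; simp [mkGrid]

theorem rot_inner (m n : Nat) (g : Nat → Nat → Int) (i : Nat) (v : Nat → Int) (hi : i < m) :
    ∀ t, t ≤ n →
    (List.range t).foldl (fun rot rr => rot.modify i (fun row => row.set rr (v rr))) (mkGrid m n g) =
      mkGrid m n (fun i' j => if i' = i ∧ j < t then v j else g i' j)
  | 0, _ => by
    simp only [List.range_zero, List.foldl_nil]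
    exact mkGrid_congr (by intro a _ b _; simp)
  | t+1, ht => by
    rw [List.range_succ, List.foldl_append, rot_inner m n g i v hi t (by omega)]
    simp only [List.foldl_cons, List.foldl_nil]
    rw [modify_set_mkGrid m n _ i t (v t) hi (by omega)]
    exact mkGrid_congr (by
      intro a ha b hb
      by_cases h1 : a = i <;> by_cases h2 : b = t <;> by_cases h3 : b < t <;> simp_all <;> omega)

theorem rot_outer (m n : Nat) (f : Nat → Nat → Int) (prev : List (List Int))
    (hprev : prev = mkGrid n m f) :
    ∀ k, k ≤ m →
    (List.range k).foldl (fun rot cc =>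
      (List.range n).foldl (fun rot rr =>
        rot.modify (m - cc - 1) (fun row => row.set rr (getI prev rr cc))) rot)
      (mkGrid m n (fun _ _ => 0)) =
      mkGrid m n (fun i j => if m - k ≤ i then f j (m - 1 - i) else 0)
  | 0, _ => by
    simp only [List.range_zero, List.foldl_nil]
    exact mkGrid_congr (by intro a ha b _; simp; omega)
  | k+1, hk => by
    rw [List.range_succ, List.foldl_append, rot_outer m n f prev hprev k (by omega)]
    simp only [List.foldl_cons, List.foldl_nil]
    have hv : ∀ rr < n, getI prev rr k = f rr k := by
      intro rr hrr; rw [hprev]; exact getI_mkGrid n m f rr k hrr (by omega)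
    have := rot_inner m n (fun i j => if m - k ≤ i then f j (m - 1 - i) else 0)
      (m - k - 1) (fun rr => getI prev rr k) (by omega) n (le_refl n)
    rw [this]
    exact mkGrid_congr (by
      intro a ha b hb
      simp only []
      by_cases h1 : a = m - k - 1
      · rw [if_pos ⟨h1, hb⟩]
        show getI prev (b : Int) (k : Int) = _
        rw [hv b hb, if_pos (by omega)]
        congr 1; omega
      · rw [if_neg (by simp [h1])]
        show (if m - k ≤ a then f b (m - 1 - a) else 0) = _
        by_cases h2 : m - k ≤ a
        · rw [if_pos h2, if_pos (by omega)]
        · rw [if_neg h2, if_neg (by omega)])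

theorem mkGrid_length (n m : Nat) (f : Nat → Nat → Int) : (mkGrid n m f).length = n := by
  simp [mkGrid]

theorem mkGrid_headD (n m : Nat) (f : Nat → Nat → Int) (hn : 0 < n) :
    ((mkGrid n m f).headD []).length = m := by
  cases n with
  | zero => omega
  | succ t =>
    rw [mkGrid, List.range_succ_eq_map]
    simp

theorem rotA_mkGrid (n m : Nat) (f : Nat → Nat → Int) (hn : 0 < n) :
    rotA (mkGrid n m f) = mkGrid m n (fun i j => f j (m - 1 - i)) := by
  show (List.range ((mkGrid n m f).headD []).length).foldl _ _ = _
  rw [mkGrid_headD n m f hn, replicate_mkGrid, mkGrid_length]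
  rw [rot_outer m n f (mkGrid n m f) rfl m (le_refl m)]
  exact mkGrid_congr (by intro a ha b hb; rw [if_pos (by omega)])

theorem cut_eq (n : Nat) (p0 : Int × Int) (t0 : List (Int × Int))
    (hrange : ∀ p ∈ p0 :: t0, inRN (n : Int) p) :
    (PySem.List.slice (raster n (p0 :: t0))
        (some ((p0 :: t0).foldl (fun a p => if p.1 < a then p.1 else a) (n : Int)))
        (some (((p0 :: t0).foldl (fun a p => if p.1 > a then p.1 else a) 0) + 1))).map
      (fun row => PySem.List.slice row
        (some ((p0 :: t0).foldl (fun a p => if p.2 < a then p.2 else a) (n : Int)))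
        (some (((p0 :: t0).foldl (fun a p => if p.2 > a then p.2 else a) 0) + 1))) =
    mkGrid (((p0 :: t0).foldl (fun a p => if p.1 > a then p.1 else a) 0)
        - ((p0 :: t0).foldl (fun a p => if p.1 < a then p.1 else a) (n : Int)) + 1).toNat
      (((p0 :: t0).foldl (fun a p => if p.2 > a then p.2 else a) 0)
        - ((p0 :: t0).foldl (fun a p => if p.2 < a then p.2 else a) (n : Int)) + 1).toNat
      (fun i j =>
        if (((p0 :: t0).foldl (fun a p => if p.1 < a then p.1 else a) (n : Int)) + (i : Int),
            ((p0 :: t0).foldl (fun a p => if p.2 < a then p.2 else a) (n : Int)) + (j : Int))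
            ∈ p0 :: t0 then (1 : Int) else 0) := by
  set tail := p0 :: t0 with htail
  set b1 := tail.foldl (fun a p => if p.1 > a then p.1 else a) 0 with hb1
  set b2 := tail.foldl (fun a p => if p.2 > a then p.2 else a) 0 with hb2
  set b3 := tail.foldl (fun a p => if p.1 < a then p.1 else a) (n : Int) with hb3
  set b4 := tail.foldl (fun a p => if p.2 < a then p.2 else a) (n : Int) with hb4
  obtain ⟨hmin1i, hmin1m, hmin1l, _⟩ := fold_min_facts (fun q => q.1) tail (n : Int)
  obtain ⟨hmin2i, hmin2m, hmin2l, _⟩ := fold_min_facts (fun q => q.2) tail (n : Int)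
  obtain ⟨hmax1i, hmax1m, hmax1l, _⟩ := fold_max_facts (fun q => q.1) tail 0
  obtain ⟨hmax2i, hmax2m, hmax2l, _⟩ := fold_max_facts (fun q => q.2) tail 0
  rw [← hb1] at hmax1i hmax1m hmax1l
  rw [← hb2] at hmax2i hmax2m hmax2l
  rw [← hb3] at hmin1i hmin1m hmin1l
  rw [← hb4] at hmin2i hmin2m hmin2l
  have hmem : p0 ∈ tail := by rw [htail]; exact List.mem_cons_self
  have hr := hrange p0 hmem
  obtain ⟨hr1, hr2, hr3, hr4⟩ := hr
  have h30 : 0 ≤ b3 := hmin1l 0 (by positivity) (fun q hq => (hrange q hq).1)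
  have h40 : 0 ≤ b4 := hmin2l 0 (by positivity) (fun q hq => (hrange q hq).2.2.1)
  have h1n : b1 < (n : Int) := by
    have := hmax1l ((n : Int) - 1) (by omega) (fun q hq => by have := (hrange q hq).2.1; omega)
    omega
  have h2n : b2 < (n : Int) := by
    have := hmax2l ((n : Int) - 1) (by omega) (fun q hq => by have := (hrange q hq).2.2.2; omega)
    omega
  have h31 : b3 ≤ b1 := le_trans (hmin1m p0 hmem) (hmax1m p0 hmem)
  have h42 : b4 ≤ b2 := le_trans (hmin2m p0 hmem) (hmax2m p0 hmem)
  rw [raster, mkGrid]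
  rw [slice_range_map n _ b3 (b1+1) h30 (by omega) (by omega)]
  rw [List.map_map]
  apply List.ext_getElem
  · simp [mkGrid]; omega
  · intro k h1 h2
    simp only [List.getElem_map, List.getElem_range, Function.comp_apply, mkGrid] at *
    rw [slice_range_map n _ b4 (b2+1) h40 (by omega) (by omega)]
    apply List.ext_getElem
    · simp; omega
    · intro l h3 h4
      simp only [List.getElem_map, List.getElem_range] at *
      have e1 : ((b3.toNat + k : Nat) : Int) = b3 + (k : Int) := by omega
      have e2 : ((b4.toNat + l : Nat) : Int) = b4 + (l : Int) := by omega
      rw [e1, e2]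


-- ---- linking A's running extrema to B's min/max over the cell list ----

theorem max_link (g : Int × Int → Int) (TA TB : List (Int × Int)) (s : Int × Int)
    (hmem : ∀ x, x ∈ TA ↔ x ∈ TB) (hs : s ∈ TA) (hgs : 0 ≤ g s) :
    TA.foldl (fun a p => if g p > a then g p else a) 0 =
      (PySem.List.max? (TB.map g) (fun x => x)).getD 0 := by
  obtain ⟨h1, h2, h3, _⟩ := fold_max_facts g TA 0
  have hsB : s ∈ TB := (hmem s).mp hs
  cases hmax : PySem.List.max? (TB.map g) (fun x => x) with
  | none =>
    rw [PySem.List.max?_eq_none_iff] at hmax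
    rw [List.map_eq_nil_iff] at hmax
    subst hmax
    simp at hsB
  | some m =>
    have hmm := PySem.List.max?_mem hmax
    have hub := PySem.List.max?_isMax hmax
    obtain ⟨q, hq, rfl⟩ := List.mem_map.mp hmm
    refine le_antisymm ?_ ?_
    · refine h3 (g q) ?_ ?_
      · exact le_trans hgs (hub (g s) (List.mem_map.mpr ⟨s, hsB, rfl⟩))
      · intro p hp
        exact hub (g p) (List.mem_map.mpr ⟨p, (hmem p).mp hp, rfl⟩)
    · exact h2 q ((hmem q).mpr hq)

theorem min_link (N : Int) (g : Int × Int → Int) (TA TB : List (Int × Int)) (s : Int × Int)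
    (hmem : ∀ x, x ∈ TA ↔ x ∈ TB) (hs : s ∈ TA) (hub : ∀ p ∈ TA, g p < N) :
    TA.foldl (fun a p => if g p < a then g p else a) N =
      (PySem.List.min? (TB.map g) (fun x => x)).getD 0 := by
  obtain ⟨h1, h2, h3, h4⟩ := fold_min_facts g TA N
  have hsB : s ∈ TB := (hmem s).mp hs
  cases hmin : PySem.List.min? (TB.map g) (fun x => x) with
  | none =>
    rw [PySem.List.min?_eq_none_iff] at hmin
    rw [List.map_eq_nil_iff] at hmin
    subst hmin
    simp at hsB
  | some m =>
    have hmm := PySem.List.min?_mem hmin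
    have hlb := PySem.List.min?_isMin hmin
    obtain ⟨q, hq, rfl⟩ := List.mem_map.mp hmm
    refine le_antisymm ?_ ?_
    · exact h2 q ((hmem q).mpr hq)
    · rcases h4 with h | h
      · rw [h]
        exact le_of_lt (hub q ((hmem q).mpr hq))
      · obtain ⟨p, hp, he⟩ := List.mem_map.mp h
        rw [← he]
        exact hlb (g p) (List.mem_map.mpr ⟨p, (hmem p).mp hp, rfl⟩)

-- ---- B's shifted / rotated coordinate sets ----

theorem ite_iff {P Q : Prop} [Decidable P] [Decidable Q] (h : P ↔ Q) :
    (if P then (1 : Int) else 0) = if Q then 1 else 0 := by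
  by_cases hp : P
  · rw [if_pos hp, if_pos (h.mp hp)]
  · rw [if_neg hp, if_neg (fun hq => hp (h.mpr hq))]

theorem occ_mem (TB : List (Int × Int)) (minR minC i j : Int) :
    ((i, j) ∈ PySem.Set.ofList (TB.map (fun p => (p.1 - minR, p.2 - minC)))) ↔
      (minR + i, minC + j) ∈ TB := by
  rw [PySem.Set.mem_ofList, List.mem_map]
  constructor
  · rintro ⟨p, hp, he⟩
    obtain ⟨he1, he2⟩ := Prod.mk.injEq .. |>.mp he
    have hpe : (minR + i, minC + j) = p := Prod.ext (by omega) (by omega)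
    rw [hpe]
    exact hp
  · intro hmem
    exact ⟨(minR + i, minC + j), hmem, by
      rw [Prod.mk.injEq]
      constructor <;> ring⟩

def gridOf (occ : List (Int × Int)) (h w : Int) : List (List Int) :=
  (List.range h.toNat).map (fun (i : Nat) => (List.range w.toNat).map (fun (j : Nat) =>
    if ((i : Int), (j : Int)) ∈ occ then (1 : Int) else 0))

def rotS (occ : List (Int × Int)) (w : Int) : List (Int × Int) :=
  PySem.Set.ofList (occ.map (fun p => (w - 1 - p.2, p.1)))

theorem gridOf_mkGrid (occ : List (Int × Int)) (h w : Int) :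
    gridOf occ h w = mkGrid h.toNat w.toNat
      (fun i j => if ((i : Int), (j : Int)) ∈ occ then (1 : Int) else 0) := rfl

theorem rot_grid (occ : List (Int × Int)) (h w : Int) (hh : 0 < h) :
    gridOf (rotS occ w) w h = rotA (gridOf occ h w) := by
  rw [gridOf_mkGrid, gridOf_mkGrid, rotA_mkGrid h.toNat w.toNat _ (by omega)]
  apply mkGrid_congr
  intro i hi j hj
  have hcast : ((w.toNat - 1 - i : Nat) : Int) = w - 1 - (i : Int) := by omega
  rw [hcast]
  apply ite_iff
  rw [rotS, PySem.Set.mem_ofList, List.mem_map]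
  constructor
  · rintro ⟨p, hp, he⟩
    obtain ⟨he1, he2⟩ := Prod.mk.injEq .. |>.mp he
    have hpe : ((j : Int), w - 1 - (i : Int)) = p := Prod.ext (by omega) (by omega)
    rw [hpe]
    exact hp
  · intro hmem
    exact ⟨((j : Int), w - 1 - (i : Int)), hmem, by
      rw [Prod.mk.injEq]
      constructor
      · ring_nf
      · rfl⟩

-- ---- the isolated-start case (right disjunct of Pre_) ----

theorem gtrace_isolated (table : List (List Int)) (N : Int)
    (comb : List (Int × Int) → List (Int × Int) → List (Int × Int))
    (hnil : comb [] [] = []) (f : Nat) (s : Int × Int) (vis : List (List Int))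
    (hs0 : getI vis s.1 s.2 = 0) (hs1 : 0 ≤ s.1) (hs2 : 0 ≤ s.2)
    (h1 : s.1.toNat < vis.length) (h2 : s.2.toNat < (vis.getD s.1.toNat []).length)
    (hiso : ∀ p ∈ nbrsP s.1 s.2, inRN N p → getI vis p.1 p.2 ≠ 0) :
    gtrace table N comb (f + 2) [s] vis = [s] := by
  show gtrace table N comb ((f + 1) + 1) [s] vis = [s]
  rw [gtrace, if_neg (by simp [hs0])]
  have hfilter : (nbrsP s.1 s.2).filter (okB table (setI vis s.1 s.2 1) N) = [] := by
    rw [List.filter_eq_nil_iff]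
    intro p hp
    by_cases hin : inRN N p
    · have hne : p.1 ≠ s.1 ∨ p.2 ≠ s.2 := by
        simp only [nbrsP, List.mem_cons, List.not_mem_nil, or_false] at hp
        rcases hp with rfl | rfl | rfl | rfl <;> simp <;> omega
      have hsame : getI (setI vis s.1 s.2 1) p.1 p.2 = getI vis p.1 p.2 :=
        getI_setI_ne vis s.1 s.2 p.1 p.2 1 hin.1 hin.2.2.1 hne
      have hnz : ¬ getI vis p.1 p.2 = 0 := hiso p hp hin
      simp [okB, hsame, hnz]
    · simp only [inRN, not_and_or] at hin
      simp [okB]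
      intro ha hb hc hd
      exfalso
      rcases hin with h | h | h | h <;> omega
  rw [hfilter, hnil]
  show _ :: gtrace table N comb (f + 1) [] _ = [s]
  simp [gtrace]

-- ---- assembled forms of the two ports ----

def cutA (L : Nat) (T : List (Int × Int)) : List (List Int) :=
  (PySem.List.slice
      (T.foldl (fun g p => setI g p.1 p.2 1) (List.replicate L (List.replicate L 0)))
      (some (T.foldl (fun a p => if p.1 < a then p.1 else a) (L : Int)))
      (some ((T.foldl (fun a p => if p.1 > a then p.1 else a) 0) + 1))).map
    (fun row => PySem.List.slice row
      (some (T.foldl (fun a p => if p.2 < a then p.2 else a) (L : Int)))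
      (some ((T.foldl (fun a p => if p.2 > a then p.2 else a) 0) + 1)))

def asmA (L : Nat) (T : List (Int × Int)) : List (List (List Int)) :=
  [cutA L T, rotA (cutA L T), rotA (rotA (cutA L T)), rotA (rotA (rotA (cutA L T)))]

def loR (T : List (Int × Int)) : Int := (PySem.List.min? (T.map Prod.fst) (fun x => x)).getD 0
def hiR (T : List (Int × Int)) : Int := (PySem.List.max? (T.map Prod.fst) (fun x => x)).getD 0
def loC (T : List (Int × Int)) : Int := (PySem.List.min? (T.map Prod.snd) (fun x => x)).getD 0
def hiC (T : List (Int × Int)) : Int := (PySem.List.max? (T.map Prod.snd) (fun x => x)).getD 0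
def occB (T : List (Int × Int)) : List (Int × Int) :=
  PySem.Set.ofList (T.map (fun p => (p.1 - loR T, p.2 - loC T)))
def boxH (T : List (Int × Int)) : Int := hiR T - loR T + 1
def boxW (T : List (Int × Int)) : Int := hiC T - loC T + 1

def asmB (T : List (Int × Int)) : List (List (List Int)) :=
  [gridOf (occB T) (boxH T) (boxW T),
   gridOf (rotS (occB T) (boxW T)) (boxW T) (boxH T),
   gridOf (rotS (rotS (occB T) (boxW T)) (boxH T)) (boxH T) (boxW T),
   gridOf (rotS (rotS (rotS (occB T) (boxW T)) (boxH T)) (boxW T)) (boxW T) (boxH T)]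

theorem bfs_char (start : List Int) (table : List (List Int)) (visited : List (List Int)) :
    bfs start table visited = asmA table.length
      (gtrace table (table.length : Int) combA (4 * table.length * table.length + 2)
        [pairOf start] visited) := by
  unfold bfs
  dsimp only
  rw [linkA]
  rfl

theorem bfs_alt_char (start : List Int) (table : List (List Int)) (visited : List (List Int)) :
    bfs_alt start table visited = asmB
      (gtrace table (table.length : Int) combB (4 * table.length * table.length + 2)
        [pairOf start] visited) := by
  unfold bfs_alt
  dsimp only
  rw [linkB]
  rfl

-- ---- putting it together ----

theorem asm_eq (L : Nat) (s : Int × Int) (TA TB : List (Int × Int))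
    (hmem : ∀ x, x ∈ TA ↔ x ∈ TB) (hsA : s ∈ TA)
    (hrange : ∀ p ∈ TA, inRN (L : Int) p) :
    asmA L TA = asmB TB := by
  obtain ⟨p0, t0, rfl⟩ : ∃ p0 t0, TA = p0 :: t0 := by
    cases TA with
    | nil => simp at hsA
    | cons p0 t0 => exact ⟨p0, t0, rfl⟩
  have hsin := hrange s hsA
  have hmaxR := max_link Prod.fst (p0 :: t0) TB s hmem hsA hsin.1
  have hmaxC := max_link Prod.snd (p0 :: t0) TB s hmem hsA hsin.2.2.1
  have hminR := min_link (L : Int) Prod.fst (p0 :: t0) TB s hmem hsA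
    (fun p hp => (hrange p hp).2.1)
  have hminC := min_link (L : Int) Prod.snd (p0 :: t0) TB s hmem hsA
    (fun p hp => (hrange p hp).2.2.2)
  obtain ⟨_, hminRm, _, _⟩ := fold_min_facts Prod.fst (p0 :: t0) (L : Int)
  obtain ⟨_, hminCm, _, _⟩ := fold_min_facts Prod.snd (p0 :: t0) (L : Int)
  obtain ⟨_, hmaxRm, _, _⟩ := fold_max_facts Prod.fst (p0 :: t0) 0
  obtain ⟨_, hmaxCm, _, _⟩ := fold_max_facts Prod.snd (p0 :: t0) 0
  set b1 := (p0 :: t0).foldl (fun a p => if p.1 > a then p.1 else a) 0 with hb1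
  set b2 := (p0 :: t0).foldl (fun a p => if p.2 > a then p.2 else a) 0 with hb2
  set b3 := (p0 :: t0).foldl (fun a p => if p.1 < a then p.1 else a) (L : Int) with hb3
  set b4 := (p0 :: t0).foldl (fun a p => if p.2 < a then p.2 else a) (L : Int) with hb4
  have h31 : b3 ≤ b1 := le_trans (hminRm s hsA) (hmaxRm s hsA)
  have h42 : b4 ≤ b2 := le_trans (hminCm s hsA) (hmaxCm s hsA)
  have heR : hiR TB = b1 := hmaxR.symm
  have heC : hiC TB = b2 := hmaxC.symm
  have heR' : loR TB = b3 := hminR.symm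
  have heC' : loC TB = b4 := hminC.symm
  have hH : boxH TB = b1 - b3 + 1 := by rw [boxH, heR, heR']
  have hW : boxW TB = b2 - b4 + 1 := by rw [boxW, heC, heC']
  have hhpos : 0 < boxH TB := by omega
  have hwpos : 0 < boxW TB := by omega
  have hcut : cutA L (p0 :: t0) =
      mkGrid (b1 - b3 + 1).toNat (b2 - b4 + 1).toNat
        (fun i j => if (b3 + (i : Int), b4 + (j : Int)) ∈ p0 :: t0 then (1 : Int) else 0) := by
    rw [cutA, show List.replicate L (List.replicate L (0 : Int)) = raster L []
      from (raster_nil L).symm]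
    rw [fold_setI_raster L (p0 :: t0) [] (fun p hp => hrange p hp), List.nil_append]
    exact cut_eq L p0 t0 hrange
  have hg0 : gridOf (occB TB) (boxH TB) (boxW TB) = cutA L (p0 :: t0) := by
    rw [hcut, gridOf_mkGrid, hH, hW]
    apply mkGrid_congr
    intro i hi j hj
    apply ite_iff
    rw [occB, occ_mem, heR', heC']
    exact (hmem _).symm
  have e1 : gridOf (rotS (occB TB) (boxW TB)) (boxW TB) (boxH TB) =
      rotA (cutA L (p0 :: t0)) := by
    rw [rot_grid (occB TB) (boxH TB) (boxW TB) hhpos, hg0]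
  have e2 : gridOf (rotS (rotS (occB TB) (boxW TB)) (boxH TB)) (boxH TB) (boxW TB) =
      rotA (rotA (cutA L (p0 :: t0))) := by
    rw [rot_grid (rotS (occB TB) (boxW TB)) (boxW TB) (boxH TB) hwpos, e1]
  have e3 : gridOf (rotS (rotS (rotS (occB TB) (boxW TB)) (boxH TB)) (boxW TB)) (boxW TB) (boxH TB) =
      rotA (rotA (rotA (cutA L (p0 :: t0)))) := by
    rw [rot_grid (rotS (rotS (occB TB) (boxW TB)) (boxH TB)) (boxH TB) (boxW TB) hhpos, e2]
  rw [asmA, asmB, hg0, e1, e2, e3]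

theorem bfs_spec_main (start : List Int) (table : List (List Int)) (visited : List (List Int))
    (hPre : Pre_bfs start table visited) :
    bfs start table visited = bfs_alt start table visited := by
  obtain ⟨hn, hstart, hsr0, hsrN, hsc0, hscN, hv1, hv2, hvz, hdisj⟩ := hPre
  have hsin : inRN (table.length : Int) (pairOf start) := ⟨hsr0, hsrN, hsc0, hscN⟩
  have hlenA : ∀ nw rest : List (Int × Int), (combA nw rest).length = nw.length + rest.length := by
    intro nw rest; simp [combA]; omega
  have hmemA : ∀ nw rest (x : Int × Int), x ∈ combA nw rest ↔ x ∈ nw ∨ x ∈ rest := by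
    intro nw rest x; simp [combA]; tauto
  have hlenB : ∀ nw rest : List (Int × Int), (combB nw rest).length = nw.length + rest.length := by
    intro nw rest; simp [combB]
  have hmemB : ∀ nw rest (x : Int × Int), x ∈ combB nw rest ↔ x ∈ nw ∨ x ∈ rest := by
    intro nw rest x; simp [combB]
  rw [bfs_char, bfs_alt_char]
  have key : (∀ x, x ∈ gtrace table (table.length : Int) combA
        (4 * table.length * table.length + 2) [pairOf start] visited ↔
      x ∈ gtrace table (table.length : Int) combB
        (4 * table.length * table.length + 2) [pairOf start] visited) ∧
      pairOf start ∈ gtrace table (table.length : Int) combA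
        (4 * table.length * table.length + 2) [pairOf start] visited ∧
      (∀ p ∈ gtrace table (table.length : Int) combA
        (4 * table.length * table.length + 2) [pairOf start] visited,
        inRN (table.length : Int) p) := by
    rcases hdisj with hwf | hiso
    · have hWF : gridWF (table.length : Int) visited := by
        refine ⟨by exact_mod_cast hwf.1, ?_⟩
        intro i hi
        have hi' : i < table.length := by exact_mod_cast hi
        exact_mod_cast hwf.2.1 i hi'
      have hq : ∀ p ∈ [pairOf start], inRN (table.length : Int) p := by
        intro p hp
        rw [List.mem_singleton] at hp
        subst hp
        exact hsin
      have hfuel : ([pairOf start] : List (Int × Int)).length +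
          4 * unvC (table.length : Int) visited ≤ 4 * table.length * table.length + 2 := by
        have h1 := unvC_le (table.length : Int) visited
        have h2 : ((table.length : Int)).toNat = table.length := Int.toNat_natCast _
        rw [h2] at h1
        have h3 : 4 * table.length * table.length = 4 * (table.length * table.length) := by
          ring
        show 1 + 4 * unvC (table.length : Int) visited ≤ 4 * table.length * table.length + 2
        omega
      have hA := gtrace_mem table (table.length : Int) combA hlenA hmemA
        (4 * table.length * table.length + 2) [pairOf start] visited hWF hq hfuel
      have hB := gtrace_mem table (table.length : Int) combB hlenB hmemB
        (4 * table.length * table.length + 2) [pairOf start] visited hWF hq hfuel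
      refine ⟨fun x => by rw [hA x, hB x], ?_, ?_⟩
      · exact (hA _).mpr (reachR.base _ _ _ List.mem_cons_self hsin hvz)
      · intro p hp
        exact reachR_inR table _ visited _ p ((hA p).mp hp)
    · have hisoP : ∀ p ∈ nbrsP (pairOf start).1 (pairOf start).2,
          inRN (table.length : Int) p → getI visited p.1 p.2 ≠ 0 := by
        intro p hp hin
        exact (hiso p hp hin.1 hin.2.1 hin.2.2.1 hin.2.2.2).2.2
      have hTA := gtrace_isolated table (table.length : Int) combA rfl
        (4 * table.length * table.length) (pairOf start) visited hvz hsr0 hsc0 hv1 hv2 hisoP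
      have hTB := gtrace_isolated table (table.length : Int) combB rfl
        (4 * table.length * table.length) (pairOf start) visited hvz hsr0 hsc0 hv1 hv2 hisoP
      rw [hTA, hTB]
      refine ⟨fun x => Iff.rfl, List.mem_cons_self, ?_⟩
      intro p hp
      rw [List.mem_singleton] at hp
      subst hp
      exact hsin
  exact asm_eq table.length (pairOf start) _ _ key.1 key.2.1 key.2.2

-- ===== VERDICT (by name: the statement is the Claim_ definition above) =====
theorem bfs_spec : Claim_equal_bfs := by
  intro start table visited _ hPre
  show bfs start table visited = bfs_alt start table visited
  exact bfs_spec_main start table visited hPre
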